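-- pv_equiv track=rewrite | github.com/JoelSchott/MST | Authoring_Assistant.py | fix_capitalization
-- ===== SOURCE A (Python) =====
-- def fix_capitalization(text):
--     end_sentence = ['.', '!', '?']
--     fixed = ''
--     num_fixed = 0
--     capitalize_next = True
--     for character in text:
--         if character in end_sentence:
--             capitalize_next = True
--             fixed += character
--         elif character != ' ':
--             if capitalize_next:
--                 fixed += str.upper(character)
--                 if character.islower():
--                     num_fixed += 1
--                 capitalize_next = False
--             else:
--                 fixed += character
--         else:
--             fixed += character
--     return fixed, num_fixed
-- ===== SOURCE B (Python) =====
-- def _cap_first(seg):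
--     # capitalize the first non-space character of the segment; report 1 if it was lowercase
--     for j, c in enumerate(seg):
--         if c != ' ':
--             return seg[:j] + c.upper() + seg[j + 1:], 1 if c.islower() else 0
--     return seg, 0
--
--
-- def fix_capitalization(text):
--     # split the text into sentence segments, each ending just after '.', '!' or '?'
--     segments = []
--     cur = ''
--     for ch in text:
--         cur += ch
--         if ch in '.!?':
--             segments.append(cur)
--             cur = ''
--     segments.append(cur)
--     fixed = ''
--     num_fixed = 0
--     for seg in segments:
--         part, n = _cap_first(seg)
--         fixed += part
--         num_fixed += n
--     return fixed, num_fixed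
-- ===== Notes on version B (the rewrite author's own statement) =====
-- stated objective: idiomatic
-- what changed: B splits the text into sentence segments ending after a sentence-terminating punctuation character and capitalizes the first non-space character of each segment, replacing A's per-character capitalize_next state machine.
import Mathlib
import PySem

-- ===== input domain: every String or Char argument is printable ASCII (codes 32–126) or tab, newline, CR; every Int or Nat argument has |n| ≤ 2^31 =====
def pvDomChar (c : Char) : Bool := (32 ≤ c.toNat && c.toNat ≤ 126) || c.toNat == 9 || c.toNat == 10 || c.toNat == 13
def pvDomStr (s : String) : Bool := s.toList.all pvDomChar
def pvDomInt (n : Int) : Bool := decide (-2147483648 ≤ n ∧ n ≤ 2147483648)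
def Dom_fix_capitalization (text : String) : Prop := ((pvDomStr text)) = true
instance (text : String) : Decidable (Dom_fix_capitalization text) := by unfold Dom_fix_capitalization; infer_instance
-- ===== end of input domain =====

-- B is an idiomatic re-decomposition: split the text into sentence segments (each ending just
-- after '.', '!' or '?') and capitalize the first non-space character of every segment, instead
-- of A's character-by-character state machine with a capitalize_next flag.


-- ===== PORT A =====
-- loop body of A (one character of the for-loop)
def stepA (st : List Char × Int × Bool) (character : Char) : List Char × Int × Bool :=
  let fixed := st.1
  let num_fixed := st.2.1
  let capitalize_next := st.2.2
  if character ∈ ['.', '!', '?'] then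
    (fixed ++ [character], num_fixed, true)
  else if character ≠ ' ' then
    if capitalize_next then
      (fixed ++ [PySem.Chars.upperChar character],
       num_fixed + (if PySem.Chars.islower character then 1 else 0), false)
    else
      (fixed ++ [character], num_fixed, capitalize_next)
  else
    (fixed ++ [character], num_fixed, capitalize_next)

def fix_capitalization (text : String) : String × Int :=
  let st := text.toList.foldl stepA ([], 0, true)
  (String.ofList st.1, st.2.1)

-- ===== PORT B =====
-- helper _cap_first of Source B: capitalize the first non-space character, count if it was lowercase
def capFirst : List Char → List Char × Int
  | [] => ([], 0)
  | c :: rest =>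
    if c ≠ ' ' then
      (PySem.Chars.upperChar c :: rest, if PySem.Chars.islower c then 1 else 0)
    else
      let r := capFirst rest
      (' ' :: r.1, r.2)

-- loop body of B's first loop (accumulate segments)
def stepS (st : List (List Char) × List Char) (ch : Char) : List (List Char) × List Char :=
  let cur := st.2 ++ [ch]
  if ch ∈ ['.', '!', '?'] then (st.1 ++ [cur], []) else (st.1, cur)

-- loop body of B's second loop (join fixed parts, sum counts)
def stepP (acc : List Char × Int) (seg : List Char) : List Char × Int :=
  let p := capFirst seg
  (acc.1 ++ p.1, acc.2 + p.2)

def fix_capitalization_alt (text : String) : String × Int :=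
  let st := text.toList.foldl stepS ([], [])
  let segments := st.1 ++ [st.2]
  let r := segments.foldl stepP ([], 0)
  (String.ofList r.1, r.2)

-- ===== PRECONDITION & SPEC =====
def Spec_fix_capitalization (text : String) (out : String × Int) : Prop := out = fix_capitalization_alt text
instance (text : String) (out : String × Int) : Decidable (Spec_fix_capitalization text out) := by unfold Spec_fix_capitalization; infer_instance

-- ===== CLAIM (what is proved, stated in full; the proofs are below) =====
def Claim_equal_fix_capitalization : Prop := ∀ (text : String), Dom_fix_capitalization text → Spec_fix_capitalization text (fix_capitalization text)

-- ===== LEMMAS AND PROOFS =====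

-- A's loop, as a structural recursion on the remaining characters (flag as argument)
def runA : Bool → List Char → List Char × Int
  | _, [] => ([], 0)
  | cap, c :: cs =>
    if c ∈ ['.', '!', '?'] then
      let r := runA true cs
      (c :: r.1, r.2)
    else if c ≠ ' ' then
      if cap then
        let r := runA false cs
        (PySem.Chars.upperChar c :: r.1,
         (if PySem.Chars.islower c then (1 : Int) else 0) + r.2)
      else
        let r := runA cap cs
        (c :: r.1, r.2)
    else
      let r := runA cap cs
      (c :: r.1, r.2)

-- B's segment split, as a structural recursion
def splitR : List Char → List Char → List (List Char)
  | cur, [] => [cur]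
  | cur, c :: cs =>
    if c ∈ ['.', '!', '?'] then (cur ++ [c]) :: splitR [] cs else splitR (cur ++ [c]) cs

-- B's second loop, as a structural recursion
def procR : List (List Char) → List Char × Int
  | [] => ([], 0)
  | s :: ss =>
    let a := capFirst s
    let r := procR ss
    (a.1 ++ r.1, a.2 + r.2)

theorem foldA_eq (cs : List Char) : ∀ (fixed : List Char) (n : Int) (cap : Bool),
    ∃ b, cs.foldl stepA (fixed, n, cap)
      = (fixed ++ (runA cap cs).1, n + (runA cap cs).2, b) := by
  induction cs with
  | nil => intro fixed n cap; exact ⟨cap, by simp [runA]⟩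
  | cons c cs ih =>
    intro fixed n cap
    by_cases hd : c ∈ ['.', '!', '?']
    · obtain ⟨b, hb⟩ := ih (fixed ++ [c]) n true
      exact ⟨b, by simp [List.foldl_cons, stepA, hd, runA, hb]⟩
    · by_cases hs : c = ' '
      · obtain ⟨b, hb⟩ := ih (fixed ++ [c]) n cap
        exact ⟨b, by simpa [List.foldl_cons, stepA, hd, hs, runA] using hb⟩
      · cases cap with
        | true =>
          obtain ⟨b, hb⟩ := ih (fixed ++ [PySem.Chars.upperChar c])
            (n + (if PySem.Chars.islower c then 1 else 0)) false
          refine ⟨b, ?_⟩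
          simpa [List.foldl_cons, stepA, hd, hs, runA, add_assoc] using hb
        | false =>
          obtain ⟨b, hb⟩ := ih (fixed ++ [c]) n false
          exact ⟨b, by simpa [List.foldl_cons, stepA, hd, hs, runA] using hb⟩

theorem foldSplit_eq (cs : List Char) : ∀ (segs : List (List Char)) (cur : List Char),
    (cs.foldl stepS (segs, cur)).1 ++ [(cs.foldl stepS (segs, cur)).2]
    = segs ++ splitR cur cs := by
  induction cs with
  | nil => intro segs cur; simp [splitR]
  | cons c cs ih =>
    intro segs cur
    by_cases hd : c ∈ ['.', '!', '?']
    · simpa [List.foldl_cons, stepS, hd, splitR] using ih (segs ++ [cur ++ [c]]) []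
    · simpa [List.foldl_cons, stepS, hd, splitR] using ih segs (cur ++ [c])

theorem foldProc_eq (segs : List (List Char)) : ∀ (fixed : List Char) (n : Int),
    segs.foldl stepP (fixed, n)
    = (fixed ++ (procR segs).1, n + (procR segs).2) := by
  induction segs with
  | nil => intro fixed n; simp [procR]
  | cons s ss ih =>
    intro fixed n
    simp [List.foldl_cons, stepP, procR, ih, add_assoc]

theorem capFirst_spaces (cur : List Char) (h : ∀ x ∈ cur, x = ' ') :
    capFirst cur = (cur, 0) := by
  induction cur with
  | nil => simp [capFirst]
  | cons c cs ih =>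
    have hc : c = ' ' := h c (by simp)
    simp [capFirst, hc, ih (fun x hx => h x (by simp [hx]))]

theorem capFirst_spaces_cons (cur : List Char) (c : Char) (r : List Char)
    (h : ∀ x ∈ cur, x = ' ') (hc : c ≠ ' ') :
    capFirst (cur ++ c :: r)
      = (cur ++ PySem.Chars.upperChar c :: r, if PySem.Chars.islower c then 1 else 0) := by
  induction cur with
  | nil => simp [capFirst, hc]
  | cons d ds ih =>
    have hd : d = ' ' := h d (by simp)
    simp [capFirst, hd, ih (fun x hx => h x (by simp [hx]))]

theorem capFirst_append_of_nonspace (cur : List Char) (r : List Char)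
    (h : ∃ x ∈ cur, x ≠ ' ') :
    capFirst (cur ++ r) = ((capFirst cur).1 ++ r, (capFirst cur).2) := by
  induction cur with
  | nil => simp at h
  | cons c cs ih =>
    by_cases hc : c = ' '
    · have : ∃ x ∈ cs, x ≠ ' ' := by
        obtain ⟨x, hx, hxne⟩ := h
        rcases List.mem_cons.mp hx with rfl | hmem
        · exact absurd hc hxne
        · exact ⟨x, hmem, hxne⟩
      simp [capFirst, hc, ih this]
    · simp [capFirst, hc]

theorem main_eq (cs : List Char) : ∀ (cur : List Char),
    ((∀ x ∈ cur, x = ' ') →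
      procR (splitR cur cs) = (cur ++ (runA true cs).1, (runA true cs).2)) ∧
    ((∃ x ∈ cur, x ≠ ' ') →
      procR (splitR cur cs)
        = ((capFirst cur).1 ++ (runA false cs).1, (capFirst cur).2 + (runA false cs).2)) := by
  induction cs with
  | nil =>
    intro cur
    constructor
    · intro h; simp [splitR, procR, runA, capFirst_spaces cur h]
    · intro _; simp [splitR, procR, runA]
  | cons c cs ih =>
    intro cur
    by_cases hd : c ∈ ['.', '!', '?']
    · have hd' : c = '.' ∨ c = '!' ∨ c = '?' := by simpa using hd
      have hcne : c ≠ ' ' := by rcases hd' with rfl | rfl | rfl <;> decide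
      have hup : PySem.Chars.upperChar c = c := by
        rcases hd' with rfl | rfl | rfl <;> decide
      have hlo : PySem.Chars.islower c = false := by
        rcases hd' with rfl | rfl | rfl <;> decide
      have htail := (ih []).1 (by simp)
      constructor
      · intro h
        simp [splitR, hd, procR, htail, runA,
          capFirst_spaces_cons cur c [] h hcne, hup, hlo]
      · intro h
        simp [splitR, hd, procR, htail, runA,
          capFirst_append_of_nonspace cur [c] h]
    · by_cases hs : c = ' '
      · constructor
        · intro h
          have := (ih (cur ++ [' '])).1 (by intro x hx; rcases List.mem_append.mp hx with hx | hx
                                            · exact h x hx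
                                            · simpa using hx)
          simp [splitR, hd, hs, runA, this]
        · intro h
          have := (ih (cur ++ [' '])).2 (by obtain ⟨x, hx, hxne⟩ := h; exact ⟨x, by simp [hx], hxne⟩)
          simp [splitR, hd, hs, runA, this,
            capFirst_append_of_nonspace cur [' '] h]
      · constructor
        · intro h
          have := (ih (cur ++ [c])).2 ⟨c, by simp, hs⟩
          simp [splitR, hd, hs, runA, this,
            capFirst_spaces_cons cur c [] h hs]
        · intro h
          have := (ih (cur ++ [c])).2 (by obtain ⟨x, hx, hxne⟩ := h; exact ⟨x, by simp [hx], hxne⟩)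
          simp [splitR, hd, hs, runA, this,
            capFirst_append_of_nonspace cur [c] h]

-- ===== VERDICT (by name: the statement is the Claim_ definition above) =====
theorem fix_capitalization_spec : Claim_equal_fix_capitalization := by
  intro text _
  unfold Spec_fix_capitalization fix_capitalization fix_capitalization_alt
  obtain ⟨b, hb⟩ := foldA_eq text.toList [] 0 true
  have hsplit : (text.toList.foldl stepS ([], [])).1 ++ [(text.toList.foldl stepS ([], [])).2]
      = splitR [] text.toList := by simpa using foldSplit_eq text.toList [] []
  have hmain := (main_eq text.toList []).1 (by simp)
  simp only [hb, hsplit, foldProc_eq, hmain]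
  simp
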